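-- pv_equiv track=rewrite | github.com/YuvalDellus/IntroToCS | ex5/ex5.py | sum_basket
-- ===== SOURCE A (Python) =====
-- ZERO = 0
--
-- def sum_basket(price_list):
--     '''
--     Receives a list of prices
--     Returns a tuple - the sum of the list (when ignoring Nones)
--       and the number of missing items (Number of Nones)
--
--     '''
--     sum_price_list = ZERO
--     missing_items = ZERO
--     for item_price in price_list:
--         if item_price is None:
--             missing_items += 1  # counts missing items
--         else:
--             sum_price_list += item_price  # sum all prices
--     return (sum_price_list, missing_items)
-- ===== SOURCE B (Python) =====
-- def sum_basket(price_list):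
--     n = len(price_list)
--     if n == 0:
--         return (0, 0)
--     if n == 1:
--         p = price_list[0]
--         return (0, 1) if p is None else (p, 0)
--     mid = n // 2
--     s1, m1 = sum_basket(price_list[:mid])
--     s2, m2 = sum_basket(price_list[mid:])
--     return (s1 + s2, m1 + m2)
-- ===== Notes on version B (the rewrite author's own statement) =====
-- stated objective: alternative
-- what changed: Replaced A's single left-to-right accumulator loop by a divide-and-conquer recursion that splits the list in half, solves the halves independently and adds the two partial (sum, missing) pairs; correct because both components are sums of per-element contributions, which are associative.
import Mathlib
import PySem

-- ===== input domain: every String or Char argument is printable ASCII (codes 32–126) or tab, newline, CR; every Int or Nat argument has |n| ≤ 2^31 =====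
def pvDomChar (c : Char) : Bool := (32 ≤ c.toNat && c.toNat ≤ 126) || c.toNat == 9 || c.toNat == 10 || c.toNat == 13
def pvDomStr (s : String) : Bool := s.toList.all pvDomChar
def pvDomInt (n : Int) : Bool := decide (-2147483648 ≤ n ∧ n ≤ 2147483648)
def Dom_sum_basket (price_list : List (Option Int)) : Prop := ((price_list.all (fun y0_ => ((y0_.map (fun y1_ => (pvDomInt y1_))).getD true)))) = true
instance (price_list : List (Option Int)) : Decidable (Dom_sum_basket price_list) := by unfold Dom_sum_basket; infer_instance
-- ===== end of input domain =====

-- B replaces A's single accumulator loop by a divide-and-conquer recursion on list halves; alternative decomposition, same results.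
-- ===== PORT A =====
def sum_basket (price_list : List (Option Int)) : Int × Int :=
  price_list.foldl
    (fun st item_price =>
      match item_price with
      | none => (st.1, st.2 + 1)
      | some p => (st.1 + p, st.2))
    (0, 0)

-- ===== PORT B =====
-- slices price_list[:mid] / price_list[mid:] with 0 ≤ mid ≤ n are exactly List.take / List.drop
def sum_basket_alt (price_list : List (Option Int)) : Int × Int :=
  match price_list with
  | [] => (0, 0)
  | [none] => (0, 1)
  | [some p] => (p, 0)
  | a :: b :: rest =>
    let mid := (a :: b :: rest).length / 2
    let r1 := sum_basket_alt ((a :: b :: rest).take mid)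
    let r2 := sum_basket_alt ((a :: b :: rest).drop mid)
    (r1.1 + r2.1, r1.2 + r2.2)
termination_by price_list.length
decreasing_by
  · simp; omega
  · simp; omega

-- ===== PRECONDITION & SPEC =====
def Spec_sum_basket (price_list : List (Option Int)) (out : Int × Int) : Prop := out = sum_basket_alt price_list
instance (price_list : List (Option Int)) (out : Int × Int) : Decidable (Spec_sum_basket price_list out) := by unfold Spec_sum_basket; infer_instance

-- ===== CLAIM (what is proved, stated in full; the proofs are below) =====
def Claim_equal_sum_basket : Prop := ∀ (price_list : List (Option Int)), Dom_sum_basket price_list → Spec_sum_basket price_list (sum_basket price_list)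

-- ===== LEMMAS AND PROOFS =====

-- ===== VERDICT (by name: the statement is the Claim_ definition above) =====
lemma sum_basket_loop (l : List (Option Int)) (s m : Int) :
    l.foldl
      (fun st item_price =>
        match item_price with
        | none => (st.1, st.2 + 1)
        | some p => (st.1 + p, st.2))
      (s, m)
    = (s + (l.filterMap id).sum, m + (l.count none : Int)) := by
  induction l generalizing s m with
  | nil => simp
  | cons h t ih =>
    cases h with
    | none => simp [List.foldl, ih]; ring
    | some p => simp [List.foldl, ih]; ring

lemma sum_basket_alt_eq (l : List (Option Int)) :
    sum_basket_alt l = ((l.filterMap id).sum, (l.count none : Int)) := by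
  fun_induction sum_basket_alt l with
  | case1 => simp
  | case2 => simp
  | case3 p => simp
  | case4 a b rest mid r1 r2 ihtake ihdrop =>
    have h1 : r1 = ((((a :: b :: rest).take mid).filterMap id).sum,
        (((a :: b :: rest).take mid).count none : Int)) := ihtake
    have h2 : r2 = ((((a :: b :: rest).drop mid).filterMap id).sum,
        (((a :: b :: rest).drop mid).count none : Int)) := ihdrop
    rw [h1, h2]
    have htd : (a :: b :: rest).take mid ++ (a :: b :: rest).drop mid = a :: b :: rest :=
      List.take_append_drop _ _
    refine Prod.ext ?_ ?_
    · conv_rhs => rw [← htd]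
      rw [List.filterMap_append, List.sum_append]
    · conv_rhs => rw [← htd]
      rw [List.count_append]
      push_cast
      ring

theorem sum_basket_spec : Claim_equal_sum_basket := by
  intro l _
  unfold Spec_sum_basket sum_basket
  rw [sum_basket_alt_eq]
  simpa using sum_basket_loop l 0 0
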